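-- pv_equiv track=rewrite | github.com/andrasfe/specter | specter/agent_compile.py | _group_errors
-- ===== SOURCE A (Python) =====
-- def _group_errors(
--     errors: list[tuple[int, str]], max_gap: int = 50,
-- ) -> list[list[tuple[int, str]]]:
--     """Group errors by proximity — errors within max_gap lines of each other.
--
--     Returns a list of groups, each group is a list of (lineno, msg) tuples.
--     """
--     if not errors:
--         return []
--
--     sorted_errors = sorted(errors, key=lambda e: e[0])
--     groups: list[list[tuple[int, str]]] = []
--     current: list[tuple[int, str]] = [sorted_errors[0]]
--
--     for lineno, msg in sorted_errors[1:]: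
--         if lineno - current[-1][0] <= max_gap:
--             current.append((lineno, msg))
--         else:
--             groups.append(current)
--             current = [(lineno, msg)]
--     groups.append(current)
--
--     return groups
-- ===== SOURCE B (Python) =====
-- def _group_errors(
--     errors: list[tuple[int, str]], max_gap: int = 50,
-- ) -> list[list[tuple[int, str]]]:
--     """Group errors by proximity: find break boundaries, then partition by slicing."""
--     se = sorted(errors, key=lambda e: e[0])
--     if not se:
--         return []
--     starts = [0] + [i for i in range(1, len(se)) if se[i][0] - se[i - 1][0] > max_gap]
--     return [se[a:b] for a, b in zip(starts, starts[1:] + [len(se)])]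
-- ===== Notes on version B (the rewrite author's own statement) =====
-- stated objective: alternative
-- what changed: Replaced the mutable-accumulator fold (grow 'current', flush on a big gap) by a two-phase shape: first compute the break indices where the gap exceeds max_gap, then partition the sorted list by slicing between consecutive boundaries.
import Mathlib
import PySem

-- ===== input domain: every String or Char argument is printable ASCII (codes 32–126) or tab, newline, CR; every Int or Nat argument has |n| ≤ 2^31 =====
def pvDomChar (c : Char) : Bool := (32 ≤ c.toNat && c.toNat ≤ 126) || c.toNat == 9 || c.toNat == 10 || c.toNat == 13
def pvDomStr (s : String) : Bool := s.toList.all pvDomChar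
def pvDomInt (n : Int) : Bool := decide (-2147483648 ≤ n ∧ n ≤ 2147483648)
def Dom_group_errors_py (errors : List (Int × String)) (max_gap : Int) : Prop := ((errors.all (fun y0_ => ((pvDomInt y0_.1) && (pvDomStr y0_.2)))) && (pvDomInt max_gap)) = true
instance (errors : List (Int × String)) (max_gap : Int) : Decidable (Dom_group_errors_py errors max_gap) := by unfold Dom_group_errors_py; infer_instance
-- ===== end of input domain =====

-- B groups by first computing the break indices and then slicing between consecutive
-- boundaries, instead of A's fold with a mutable current-group accumulator (objective:
-- alternative decomposition, same cost).

-- ===== PORT A =====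
-- Python A: sort, then fold over sorted_errors[1:] carrying (groups, current);
-- current[-1] is ported as pyGetD current (-1) (current is never empty along the loop).
def group_errors_py (errors : List (Int × String)) (max_gap : Int) : List (List (Int × String)) :=
  if errors = [] then []
  else
    match PySem.List.sorted errors (fun e => e.1) false with
    | [] => []  -- unreachable: errors ≠ [] so the sorted list is nonempty
    | x :: rest =>  -- sorted_errors[0] = x, sorted_errors[1:] = rest
      let st := rest.foldl
        (fun (s : List (List (Int × String)) × List (Int × String)) e =>
          if e.1 - (PySem.List.pyGetD s.2 (-1) (0, "")).1 ≤ max_gap then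
            (s.1, s.2 ++ [e])
          else
            (s.1 ++ [s.2], [e]))
        ([], [x])
      st.1 ++ [st.2]

-- ===== PORT B =====
def group_errors_py_alt (errors : List (Int × String)) (max_gap : Int) : List (List (Int × String)) :=
  let se := PySem.List.sorted errors (fun e => e.1) false
  if se = [] then []
  else
    let starts : List Int :=
      0 :: (PySem.List.pyRange 1 (se.length : Int) 1).filter
        (fun i => decide ((PySem.List.pyGetD se i (0, "")).1
                          - (PySem.List.pyGetD se (i - 1) (0, "")).1 > max_gap))
    (starts.zip (PySem.List.slice starts (some 1) none ++ [(se.length : Int)])).map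
      (fun ab => PySem.List.slice se (some ab.1) (some ab.2))

-- ===== PRECONDITION & SPEC =====
def Spec_group_errors_py (errors : List (Int × String)) (max_gap : Int) (out : List (List (Int × String))) : Prop := out = group_errors_py_alt errors max_gap
instance (errors : List (Int × String)) (max_gap : Int) (out : List (List (Int × String))) : Decidable (Spec_group_errors_py errors max_gap out) := by unfold Spec_group_errors_py; infer_instance

-- ===== CLAIM (what is proved, stated in full; the proofs are below) =====
def Claim_equal_group_errors_py : Prop := ∀ (errors : List (Int × String)) (max_gap : Int), Dom_group_errors_py errors max_gap → Spec_group_errors_py errors max_gap (group_errors_py errors max_gap)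

-- ===== LEMMAS AND PROOFS =====

-- Canonical back-to-front grouping; both ports are proved equal to it.
def pvChunks (g : Int) : List (Int × String) → List (List (Int × String))
  | [] => []
  | x :: t =>
    match pvChunks g t with
    | (y :: ys) :: gs => if y.1 - x.1 ≤ g then (x :: y :: ys) :: gs else [x] :: (y :: ys) :: gs
    | gs => [x] :: gs

-- shape: pvChunks of a nonempty list is nonempty and its first group starts with the head
theorem pvChunks_shape (g : Int) (x : Int × String) (t : List (Int × String)) :
    ∃ ys gs, pvChunks g (x :: t) = (x :: ys) :: gs := by
  induction t generalizing x with
  | nil => exact ⟨[], [], rfl⟩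
  | cons y t' ih =>
    obtain ⟨ys, gs, h⟩ := ih y
    have hx : pvChunks g (x :: y :: t')
        = if y.1 - x.1 ≤ g then (x :: y :: ys) :: gs else [x] :: (y :: ys) :: gs := by
      rw [pvChunks, h]
    by_cases hc : y.1 - x.1 ≤ g
    · exact ⟨y :: ys, gs, by rw [hx, if_pos hc]⟩
    · exact ⟨[], (y :: ys) :: gs, by rw [hx, if_neg hc]⟩

def pvConsHead (pre : List (Int × String)) : List (List (Int × String)) → List (List (Int × String))
  | [] => [pre]
  | G :: gs => (pre ++ G) :: gs

theorem pvA_loop (g : Int) (t : List (Int × String)) :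
    ∀ (pre : List (Int × String)) (c : Int × String) (groups : List (List (Int × String))),
    (let st := t.foldl
        (fun (s : List (List (Int × String)) × List (Int × String)) e =>
          if e.1 - (PySem.List.pyGetD s.2 (-1) (0, "")).1 ≤ g then
            (s.1, s.2 ++ [e])
          else
            (s.1 ++ [s.2], [e]))
        (groups, pre ++ [c])
     st.1 ++ [st.2]) = groups ++ pvConsHead pre (pvChunks g (c :: t)) := by
  induction t generalizing g with
  | nil => intro pre c groups; simp [pvChunks, pvConsHead]
  | cons y ys ih =>
    intro pre c groups
    simp only [List.foldl_cons, PySem.List.pyGetD_neg_one_append_singleton]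
    obtain ⟨zs, gs, hsh⟩ := pvChunks_shape g y ys
    have hch : pvChunks g (c :: y :: ys)
        = if y.1 - c.1 ≤ g then (c :: y :: zs) :: gs else [c] :: (y :: zs) :: gs := by
      rw [pvChunks, hsh]
    by_cases hc : y.1 - c.1 ≤ g
    · rw [if_pos hc]
      have := ih g (pre ++ [c]) y groups
      rw [this, hch, if_pos hc, hsh]
      simp [pvConsHead]
    · rw [if_neg hc]
      have := ih g [] y (groups ++ [pre ++ [c]])
      simp only [List.nil_append] at this
      rw [this, hch, if_neg hc, hsh]
      simp [pvConsHead]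

theorem pvA_eq_chunks (errors : List (Int × String)) (g : Int) :
    group_errors_py errors g = pvChunks g (PySem.List.sorted errors (fun e => e.1) false) := by
  by_cases he : errors = []
  · subst he; simp [group_errors_py, PySem.List.sorted, pvChunks]
  · unfold group_errors_py
    rw [if_neg he]
    have hne : PySem.List.sorted errors (fun e => e.1) false ≠ [] := by
      intro h
      have := PySem.List.sorted_perm (xs := errors) (key := fun e => e.1) (rev := false)
      rw [h] at this
      exact he (List.Perm.nil_eq this).symm
    cases hse : PySem.List.sorted errors (fun e => e.1) false with
    | nil => exact absurd hse hne
    | cons x rest =>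
      have hl := pvA_loop g rest [] x []
      simp only [List.nil_append] at hl
      dsimp only
      rw [hl]
      obtain ⟨ys, gs, hsh⟩ := pvChunks_shape g x rest
      rw [hsh]
      simp [pvConsHead]

-- ===== B side =====

def pvBreaks (g : Int) (se : List (Int × String)) : List Int :=
  (PySem.List.pyRange 1 (se.length : Int) 1).filter
    (fun i => decide ((PySem.List.pyGetD se i (0, "")).1
                      - (PySem.List.pyGetD se (i - 1) (0, "")).1 > g))

def pvSlices (se : List (Int × String)) (starts : List Int) : List (List (Int × String)) :=
  (starts.zip (starts.tail ++ [(se.length : Int)])).map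
    (fun ab => PySem.List.slice se (some ab.1) (some ab.2))

theorem pvAlt_eq (errors : List (Int × String)) (g : Int) :
    group_errors_py_alt errors g =
      (let se := PySem.List.sorted errors (fun e => e.1) false
       if se = [] then [] else pvSlices se (0 :: pvBreaks g se)) := by
  simp only [group_errors_py_alt, pvSlices, pvBreaks, PySem.List.slice_from_one]

theorem pvGetD_cons_of_pos (x : Int × String) (t : List (Int × String)) (i : Int)
    (h1 : 1 ≤ i) (h2 : i < (t.length : Int) + 1) :
    PySem.List.pyGetD (x :: t) i (0, "") = PySem.List.pyGetD t (i - 1) (0, "") := by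
  rw [PySem.List.pyGetD_eq_getElem (x :: t) (0, "") (by omega)
        (by simp only [List.length_cons]; push_cast; omega),
      PySem.List.pyGetD_eq_getElem t (0, "") (by omega) (by omega)]
  have h : i.toNat = (i - 1).toNat + 1 := by omega
  simp only [h, List.getElem_cons_succ]

theorem pvRange_shift (m : Int) :
    PySem.List.pyRange 2 (m + 1) 1 = (PySem.List.pyRange 1 m 1).map (· + 1) := by
  rw [PySem.List.pyRange_one, PySem.List.pyRange_one, List.map_map]
  have : (m + 1 - 2) = m - 1 := by ring
  rw [this]
  apply List.map_congr_left
  intro k _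
  simp; omega

theorem pvBreaks_nil (g : Int) (x : Int × String) : pvBreaks g [x] = [] := by
  simp [pvBreaks, PySem.List.pyRange_one_eq_nil]

theorem pvPred_shift (g : Int) (x y : Int × String) (t' : List (Int × String)) :
    ∀ j ∈ PySem.List.pyRange 1 (((y :: t').length : Int)) 1,
      ((fun i => decide ((PySem.List.pyGetD (x :: y :: t') i (0, "")).1
            - (PySem.List.pyGetD (x :: y :: t') (i - 1) (0, "")).1 > g)) ∘ (· + 1)) j
      = (fun i => decide ((PySem.List.pyGetD (y :: t') i (0, "")).1
            - (PySem.List.pyGetD (y :: t') (i - 1) (0, "")).1 > g)) j := by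
  intro j hj
  obtain ⟨hj1, hj2⟩ := (PySem.List.mem_pyRange_one).1 hj
  simp only [List.length_cons] at hj2
  push_cast at hj2
  simp only [Function.comp_apply]
  rw [pvGetD_cons_of_pos x (y :: t') (j + 1) (by omega)
        (by simp only [List.length_cons]; push_cast; omega)]
  have hsub : j + 1 - 1 = j := by ring
  rw [hsub, pvGetD_cons_of_pos x (y :: t') j (by omega)
        (by simp only [List.length_cons]; push_cast; omega)]

theorem pvBreaks_cons (g : Int) (x y : Int × String) (t' : List (Int × String)) :
    pvBreaks g (x :: y :: t') =
      (if y.1 - x.1 > g then [1] else []) ++ (pvBreaks g (y :: t')).map (· + 1) := by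
  unfold pvBreaks
  have hlen : ((x :: y :: t').length : Int) = ((y :: t').length : Int) + 1 := by simp
  rw [hlen]
  rw [PySem.List.pyRange_one_cons
        (by simp only [List.length_cons]; push_cast; omega)]
  rw [show (1 : Int) + 1 = 2 from rfl, pvRange_shift]
  have h1 : PySem.List.pyGetD (x :: y :: t') 1 (0, "") = y := by
    rw [pvGetD_cons_of_pos x (y :: t') 1 (by omega)
          (by simp only [List.length_cons]; push_cast; omega)]
    norm_num [PySem.List.pyGetD_zero_cons]
  have h0 : PySem.List.pyGetD (x :: y :: t') (1 - 1) (0, "") = x := by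
    norm_num [PySem.List.pyGetD_zero_cons]
  simp only [List.filter_cons, List.filter_map]
  rw [List.filter_congr (pvPred_shift g x y t'), h1, h0]
  by_cases hc : y.1 - x.1 > g <;> simp [hc]

theorem pvBreaks_pos (g : Int) (se : List (Int × String)) :
    ∀ i ∈ pvBreaks g se, 1 ≤ i := by
  intro i hi
  unfold pvBreaks at hi
  have := List.mem_of_mem_filter hi
  exact ((PySem.List.mem_pyRange_one).1 this).1

theorem pvSlice_cons_succ (x : Int × String) (t : List (Int × String)) (a b : Int)
    (ha : 0 ≤ a) (hb : 0 ≤ b) :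
    PySem.List.slice (x :: t) (some (a + 1)) (some (b + 1)) = PySem.List.slice t (some a) (some b) := by
  rw [PySem.List.slice_toNat _ (by omega) (by omega), PySem.List.slice_toNat _ ha hb]
  have h1 : (a + 1).toNat = a.toNat + 1 := by omega
  have h2 : (b + 1).toNat - (a + 1).toNat = b.toNat - a.toNat := by omega
  rw [h2, h1]
  simp

theorem pvSlices_shift (x : Int × String) (t : List (Int × String)) (l1 l2 : List Int)
    (h1 : ∀ a ∈ l1, 0 ≤ a) (h2 : ∀ b ∈ l2, 0 ≤ b) :
    ((l1.map (· + 1)).zip (l2.map (· + 1))).map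
        (fun ab => PySem.List.slice (x :: t) (some ab.1) (some ab.2))
      = (l1.zip l2).map (fun ab => PySem.List.slice t (some ab.1) (some ab.2)) := by
  rw [List.zip_map, List.map_map]
  apply List.map_congr_left
  intro ab hab
  obtain ⟨ha, hb⟩ := List.of_mem_zip hab
  simp only [Function.comp, Prod.map]
  exact pvSlice_cons_succ x t ab.1 ab.2 (h1 _ ha) (h2 _ hb)

theorem pvB_eq_chunks (g : Int) (se : List (Int × String)) (hne : se ≠ []) :
    pvSlices se (0 :: pvBreaks g se) = pvChunks g se := by
  induction se with
  | nil => exact absurd rfl hne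
  | cons x t ih =>
    cases t with
    | nil =>
      simp [pvSlices, pvBreaks_nil, pvChunks, PySem.List.slice_toNat]
    | cons y t' =>
      have hpos := pvBreaks_pos g (y :: t')
      have hSnonneg : ∀ a ∈ (0 : Int) :: pvBreaks g (y :: t'), 0 ≤ a := by
        intro a ha
        rcases List.mem_cons.1 ha with h | h
        · omega
        · exact le_trans (by omega) (hpos a h)
      have hEnonneg : ∀ b ∈ pvBreaks g (y :: t') ++ [((y :: t').length : Int)], 0 ≤ b := by
        intro b hb
        rcases List.mem_append.1 hb with h | h
        · exact le_trans (by omega) (hpos b h)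
        · simp at h; omega
      have ihh := ih (by simp)
      have hlen : (((x :: y :: t').length : Int)) = ((y :: t').length : Int) + 1 := by simp
      rw [pvBreaks_cons]
      by_cases hc : y.1 - x.1 > g
      · -- break right after x: first slice is [x], the rest is B's grouping of the tail, shifted
        simp only [hc, if_pos]
        unfold pvSlices
        simp only [List.cons_append, List.nil_append, List.tail_cons, List.zip_cons_cons,
          List.map_cons]
        have hfirst : PySem.List.slice (x :: y :: t') (some 0) (some 1) = [x] := by
          rw [PySem.List.slice_toNat _ (by omega) (by omega)]; rfl
        have h1 : (1 : Int) :: (pvBreaks g (y :: t')).map (· + 1)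
            = ((0 : Int) :: pvBreaks g (y :: t')).map (· + 1) := by simp
        have h2 : (pvBreaks g (y :: t')).map (· + 1) ++ [(((x :: y :: t').length : Int))]
            = (pvBreaks g (y :: t') ++ [((y :: t').length : Int)]).map (· + 1) := by
          rw [List.map_append, hlen]; rfl
        rw [hfirst, h1, h2,
          pvSlices_shift x (y :: t') _ _ hSnonneg hEnonneg]
        have h3 : (((0 : Int) :: pvBreaks g (y :: t')).zip
              (pvBreaks g (y :: t') ++ [((y :: t').length : Int)])).map
              (fun ab => PySem.List.slice (y :: t') (some ab.1) (some ab.2))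
            = pvSlices (y :: t') ((0 : Int) :: pvBreaks g (y :: t')) := rfl
        rw [h3, ihh]
        obtain ⟨ys, gs, hsh⟩ := pvChunks_shape g y t'
        have hch : pvChunks g (x :: y :: t')
            = if y.1 - x.1 ≤ g then (x :: y :: ys) :: gs else [x] :: (y :: ys) :: gs := by
          rw [pvChunks, hsh]
        rw [hsh, hch, if_neg (by omega)]
      · -- no break: x joins the first group of the tail's grouping
        simp only [hc, if_false, List.nil_append]
        unfold pvSlices
        cases hE : pvBreaks g (y :: t') ++ [((y :: t').length : Int)] with
        | nil => simp at hE
        | cons e E' =>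
          have he0 : 0 ≤ e := hEnonneg e (by rw [hE]; exact List.mem_cons_self ..)
          have hE'nonneg : ∀ b ∈ E', 0 ≤ b := fun b hb =>
            hEnonneg b (by rw [hE]; exact List.mem_cons_of_mem _ hb)
          have hmapE : (pvBreaks g (y :: t')).map (· + 1) ++ [(((x :: y :: t').length : Int))]
              = (e + 1) :: E'.map (· + 1) := by
            have : (pvBreaks g (y :: t')).map (· + 1) ++ [((y :: t').length : Int) + 1]
                = (pvBreaks g (y :: t') ++ [((y :: t').length : Int)]).map (· + 1) := by
              rw [List.map_append]; rfl
            rw [hlen, this, hE]; rfl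
          simp only [List.tail_cons, hmapE, List.zip_cons_cons, List.map_cons]
          have hfirst : PySem.List.slice (x :: y :: t') (some 0) (some (e + 1))
              = x :: PySem.List.slice (y :: t') (some 0) (some e) := by
            rw [PySem.List.slice_toNat _ (by omega) (by omega),
                PySem.List.slice_toNat _ (by omega) he0]
            have h1 : (e + 1).toNat = e.toNat + 1 := by omega
            simp [h1]
          rw [hfirst,
            pvSlices_shift x (y :: t') (pvBreaks g (y :: t')) E'
              (fun a ha => le_trans (by omega) (hpos a ha)) hE'nonneg]
          have hB : pvSlices (y :: t') ((0 : Int) :: pvBreaks g (y :: t'))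
              = PySem.List.slice (y :: t') (some 0) (some e)
                :: ((pvBreaks g (y :: t')).zip E').map
                    (fun ab => PySem.List.slice (y :: t') (some ab.1) (some ab.2)) := by
            unfold pvSlices
            simp only [List.tail_cons, hE, List.zip_cons_cons, List.map_cons]
          rw [hB] at ihh
          obtain ⟨ys, gs, hsh⟩ := pvChunks_shape g y t'
          rw [hsh] at ihh
          injection ihh with hh htl
          have hch : pvChunks g (x :: y :: t')
              = if y.1 - x.1 ≤ g then (x :: y :: ys) :: gs else [x] :: (y :: ys) :: gs := by
            rw [pvChunks, hsh]
          rw [hh, htl, hch, if_pos (by omega)]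

-- ===== VERDICT (by name: the statement is the Claim_ definition above) =====
theorem group_errors_py_spec : Claim_equal_group_errors_py := by
  intro errors max_gap _
  unfold Spec_group_errors_py
  rw [pvA_eq_chunks, pvAlt_eq]
  by_cases h : PySem.List.sorted errors (fun e => e.1) false = []
  · simp [h, pvChunks]
  · simp only [h]
    exact (pvB_eq_chunks max_gap _ h).symm
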